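-- pv_equiv track=rewrite | github.com/WuFengXueYing/MODIFy | codes/preprocess/align.py | _annotate_intervals
-- ===== SOURCE A (Python) =====
-- def _annotate_intervals(intervals, faults, threshold: int):
--     labels = [-1] * len(intervals)
--     for chunk_idx, (s, e) in enumerate(intervals):
--         for (fs, fe, culprit) in faults:
--             left = max(s, fs)
--             right = min(e, fe)
--             overlap = max(0, right - left + 1)  # closed interval
--
--             if overlap >= threshold:
--                 labels[chunk_idx] = culprit
--                 break  # 只在满足阈值时才停止找
--     return labels
-- ===== SOURCE B (Python) =====
-- def _annotate_intervals(intervals, faults, threshold: int):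
--     # Fault-outer sweep: each fault (in order) claims all still-undecided
--     # intervals it qualifies for; decided intervals leave the working set.
--     undecided = dict(enumerate(intervals))
--     assigned = {}
--     for fs, fe, c in faults:
--         if not undecided:
--             break
--         still = {}
--         for i, (s, e) in undecided.items():
--             if max(0, min(e, fe) - max(s, fs) + 1) >= threshold:
--                 assigned[i] = c
--             else:
--                 still[i] = (s, e)
--         undecided = still
--     return [assigned.get(i, -1) for i in range(len(intervals))]
-- ===== Notes on version B (the rewrite author's own statement) =====
-- stated objective: alternative
-- what changed: Replaced A's interval-outer scan (for each interval, linearly find the first qualifying fault) with a fault-outer sweep that lets each fault, in order, claim all still-undecided intervals and drops decided intervals from the working set, reading labels off an assignment dict at the end.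
import Mathlib
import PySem

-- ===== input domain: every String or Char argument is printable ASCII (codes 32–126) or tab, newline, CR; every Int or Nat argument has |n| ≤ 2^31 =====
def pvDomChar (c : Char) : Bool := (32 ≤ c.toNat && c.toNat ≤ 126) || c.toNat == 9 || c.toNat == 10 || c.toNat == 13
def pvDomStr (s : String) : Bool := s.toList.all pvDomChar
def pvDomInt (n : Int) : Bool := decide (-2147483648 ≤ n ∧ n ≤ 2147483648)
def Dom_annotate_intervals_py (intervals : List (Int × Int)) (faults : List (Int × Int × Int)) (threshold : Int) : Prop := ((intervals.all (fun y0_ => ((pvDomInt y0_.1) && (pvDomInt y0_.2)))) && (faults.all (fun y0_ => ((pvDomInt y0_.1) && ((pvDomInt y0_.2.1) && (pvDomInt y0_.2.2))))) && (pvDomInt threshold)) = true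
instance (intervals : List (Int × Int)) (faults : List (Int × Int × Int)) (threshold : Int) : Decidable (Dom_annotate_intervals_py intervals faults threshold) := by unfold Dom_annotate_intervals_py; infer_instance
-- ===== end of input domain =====

-- B replaces A's interval-outer scan (first qualifying fault per interval) by a
-- fault-outer sweep over a shrinking set of undecided intervals; same results.

-- ===== PORT A =====
-- inner 'for (fs, fe, culprit) in faults: … break' loop of A
def annotateInnerA (threshold s e : Int) (idx : Int) (labels : List Int) :
    List (Int × Int × Int) → List Int
  | [] => labels
  | (fs, fe, culprit) :: rest =>
    let left := max s fs
    let right := min e fe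
    let overlap := max 0 (right - left + 1)
    if overlap ≥ threshold then PySem.List.pySetD labels idx culprit
    else annotateInnerA threshold s e idx labels rest

def annotate_intervals_py (intervals : List (Int × Int)) (faults : List (Int × Int × Int)) (threshold : Int) : List Int :=
  let labels := List.replicate intervals.length (-1)
  (PySem.List.enumerate intervals 0).foldl
    (fun labels p => annotateInnerA threshold p.2.1 p.2.2 p.1 labels faults) labels

-- ===== PORT B =====
-- body of B's 'for i, (s, e) in undecided.items(): …' loop: returns (assigned', still)
def annotateStepB (threshold fs fe c : Int) :
    List (Int × Int × Int) → PySem.Dict Int Int → PySem.Dict Int Int × List (Int × Int × Int)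
  | [], assigned => (assigned, [])
  | (i, s, e) :: rest, assigned =>
    if max 0 (min e fe - max s fs + 1) ≥ threshold then
      annotateStepB threshold fs fe c rest (assigned.insert i c)
    else
      let (a', still) := annotateStepB threshold fs fe c rest assigned
      (a', (i, s, e) :: still)

-- B's 'for fs, fe, c in faults: …' loop with the 'if not undecided: break'
def annotateGoB (threshold : Int) :
    List (Int × Int × Int) → List (Int × Int × Int) → PySem.Dict Int Int → PySem.Dict Int Int
  | [], _, assigned => assigned
  | _, [], assigned => assigned
  | (fs, fe, c) :: faults, pending, assigned =>
    let (a', still) := annotateStepB threshold fs fe c pending assigned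
    annotateGoB threshold faults still a'

def annotate_intervals_py_alt (intervals : List (Int × Int)) (faults : List (Int × Int × Int)) (threshold : Int) : List Int :=
  let assigned := annotateGoB threshold faults (PySem.List.enumerate intervals 0) PySem.Dict.empty
  (PySem.List.pyRange 0 intervals.length 1).map (fun i => assigned.getD i (-1))

-- ===== PRECONDITION & SPEC =====
def Spec_annotate_intervals_py (intervals : List (Int × Int)) (faults : List (Int × Int × Int)) (threshold : Int) (out : List Int) : Prop := out = annotate_intervals_py_alt intervals faults threshold
instance (intervals : List (Int × Int)) (faults : List (Int × Int × Int)) (threshold : Int) (out : List Int) : Decidable (Spec_annotate_intervals_py intervals faults threshold out) := by unfold Spec_annotate_intervals_py; infer_instance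

-- ===== CLAIM (what is proved, stated in full; the proofs are below) =====
def Claim_equal_annotate_intervals_py : Prop := ∀ (intervals : List (Int × Int)) (faults : List (Int × Int × Int)) (threshold : Int), Dom_annotate_intervals_py intervals faults threshold → Spec_annotate_intervals_py intervals faults threshold (annotate_intervals_py intervals faults threshold)

-- ===== LEMMAS AND PROOFS =====

-- first culprit of a fault overlapping (s,e) by at least threshold
def pvFq (threshold s e : Int) : List (Int × Int × Int) → Option Int
  | [] => none
  | (fs, fe, c) :: rest =>
    if max 0 (min e fe - max s fs + 1) ≥ threshold then some c
    else pvFq threshold s e rest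

def pvG (threshold : Int) (faults : List (Int × Int × Int)) (p : Int × Int) : Int :=
  (pvFq threshold p.1 p.2 faults).getD (-1)

theorem annotateInnerA_eq (threshold s e idx : Int) (labels : List Int)
    (faults : List (Int × Int × Int)) :
    annotateInnerA threshold s e idx labels faults =
      match pvFq threshold s e faults with
      | some c => PySem.List.pySetD labels idx c
      | none => labels := by
  induction faults with
  | nil => rfl
  | cons f rest ih =>
    obtain ⟨fs, fe, c⟩ := f
    simp only [annotateInnerA, pvFq]
    split_ifs with h <;> simp [ih]

theorem set_append_cons (pre suf : List Int) (x v : Int) :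
    (pre ++ x :: suf).set pre.length v = pre ++ v :: suf := by
  induction pre with
  | nil => rfl
  | cons a pre ih => simp [ih]

theorem annotateInnerA_none (threshold s e idx : Int) (labels : List Int)
    (faults : List (Int × Int × Int)) (h : pvFq threshold s e faults = none) :
    annotateInnerA threshold s e idx labels faults = labels := by
  rw [annotateInnerA_eq, h]

theorem annotateInnerA_some (threshold s e idx : Int) (labels : List Int)
    (faults : List (Int × Int × Int)) (c : Int) (h : pvFq threshold s e faults = some c) :
    annotateInnerA threshold s e idx labels faults = PySem.List.pySetD labels idx c := by
  rw [annotateInnerA_eq, h]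

theorem foldlA_eq (threshold : Int) (faults : List (Int × Int × Int)) :
    ∀ (l : List (Int × Int)) (pre : List Int),
    (PySem.List.enumerate l (pre.length : Int)).foldl
      (fun labels p => annotateInnerA threshold p.2.1 p.2.2 p.1 labels faults)
      (pre ++ List.replicate l.length (-1))
    = pre ++ l.map (pvG threshold faults) := by
  intro l
  induction l with
  | nil => intro pre; simp [PySem.List.enumerate_nil]
  | cons hd tl ih =>
    intro pre
    obtain ⟨s, e⟩ := hd
    rw [PySem.List.enumerate_cons]
    simp only [List.foldl_cons, List.length_cons, List.replicate_succ]
    have hlen : ((pre.length : Int) + 1) = (((pre ++ [pvG threshold faults (s, e)]).length : Int)) := by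
      simp
    cases hfq : pvFq threshold s e faults with
    | none =>
      rw [annotateInnerA_none _ _ _ _ _ _ hfq]
      have hrw : pre ++ (-1 : Int) :: List.replicate tl.length (-1)
          = (pre ++ [pvG threshold faults (s, e)]) ++ List.replicate tl.length (-1) := by
        simp [pvG, hfq]
      rw [hrw, hlen, ih (pre ++ [pvG threshold faults (s, e)])]
      simp
    | some c =>
      rw [annotateInnerA_some _ _ _ _ _ _ _ hfq]
      have hgc : pvG threshold faults (s, e) = c := by simp [pvG, hfq]
      have hset : PySem.List.pySetD (pre ++ (-1 : Int) :: List.replicate tl.length (-1)) (pre.length : Int) c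
          = (pre ++ [pvG threshold faults (s, e)]) ++ List.replicate tl.length (-1) := by
        rw [PySem.List.pySetD_natCast, set_append_cons, hgc]
        simp
      rw [hset, hlen, ih (pre ++ [pvG threshold faults (s, e)])]
      simp

-- ---- B side ----

theorem stepB_cons (threshold fs fe c i s e : Int) (rest : List (Int × Int × Int))
    (a : PySem.Dict Int Int) :
    annotateStepB threshold fs fe c ((i, s, e) :: rest) a =
      if max 0 (min e fe - max s fs + 1) ≥ threshold then
        annotateStepB threshold fs fe c rest (a.insert i c)
      else
        ((annotateStepB threshold fs fe c rest a).1,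
         (i, s, e) :: (annotateStepB threshold fs fe c rest a).2) := by
  simp only [annotateStepB]

theorem stepB_snd (threshold fs fe c : Int) :
    ∀ (pending : List (Int × Int × Int)) (a : PySem.Dict Int Int),
    (annotateStepB threshold fs fe c pending a).2
      = pending.filter (fun p => ¬ (max 0 (min p.2.2 fe - max p.2.1 fs + 1) ≥ threshold)) := by
  intro pending
  induction pending with
  | nil => intro a; rfl
  | cons hd rest ih =>
    intro a
    obtain ⟨i, s, e⟩ := hd
    rw [stepB_cons]
    by_cases h : max 0 (min e fe - max s fs + 1) ≥ threshold
    · rw [if_pos h, ih, List.filter_cons_of_neg (by simp; omega)]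
    · rw [if_neg h]
      show _ :: (annotateStepB threshold fs fe c rest a).2 = _
      rw [ih, List.filter_cons_of_pos (by simp; omega)]

theorem stepB_fst_notmem (threshold fs fe c : Int) :
    ∀ (pending : List (Int × Int × Int)) (a : PySem.Dict Int Int) (i : Int),
    i ∉ pending.map (·.1) →
    ((annotateStepB threshold fs fe c pending a).1).get? i = a.get? i := by
  intro pending
  induction pending with
  | nil => intro a i _; rfl
  | cons hd rest ih =>
    intro a i hi
    obtain ⟨j, s, e⟩ := hd
    simp only [List.map_cons, List.mem_cons, not_or] at hi
    rw [stepB_cons]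
    by_cases h : max 0 (min e fe - max s fs + 1) ≥ threshold
    · rw [if_pos h, ih _ _ hi.2, PySem.Dict.get?_insert_of_ne _ _ hi.1]
    · rw [if_neg h]; exact ih _ _ hi.2

theorem stepB_fst_mem (threshold fs fe c : Int) :
    ∀ (pending : List (Int × Int × Int)) (a : PySem.Dict Int Int) (i s e : Int),
    (i, s, e) ∈ pending → (pending.map (·.1)).Nodup →
    ((annotateStepB threshold fs fe c pending a).1).get? i =
      if max 0 (min e fe - max s fs + 1) ≥ threshold then some c else a.get? i := by
  intro pending
  induction pending with
  | nil => intro a i s e h _; simp at h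
  | cons hd rest ih =>
    intro a i s e hmem hnd
    obtain ⟨j, s', e'⟩ := hd
    simp only [List.map_cons, List.nodup_cons] at hnd
    rcases List.mem_cons.mp hmem with heq | hrest
    · injection heq with h1 h2; injection h2 with h2 h3
      subst h1; subst h2; subst h3
      have hnotin : i ∉ rest.map (·.1) := hnd.1
      rw [stepB_cons]
      by_cases h : max 0 (min e fe - max s fs + 1) ≥ threshold
      · rw [if_pos h, stepB_fst_notmem _ _ _ _ _ _ _ hnotin, PySem.Dict.get?_insert_self,
          if_pos h]
      · rw [if_neg h, if_neg h]
        exact stepB_fst_notmem _ _ _ _ _ _ _ hnotin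
    · have hij : i ≠ j := by
        intro hij; subst hij
        exact hnd.1 (List.mem_map.mpr ⟨(i, s, e), hrest, rfl⟩)
      rw [stepB_cons]
      by_cases hj : max 0 (min e' fe - max s' fs + 1) ≥ threshold
      · rw [if_pos hj, ih _ _ _ _ hrest hnd.2]
        by_cases hi : max 0 (min e fe - max s fs + 1) ≥ threshold
        · rw [if_pos hi, if_pos hi]
        · rw [if_neg hi, if_neg hi, PySem.Dict.get?_insert_of_ne _ _ hij]
      · rw [if_neg hj]
        exact ih _ _ _ _ hrest hnd.2

theorem goB_cons (threshold fs fe c : Int) (faults : List (Int × Int × Int))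
    (p : Int × Int × Int) (ps : List (Int × Int × Int)) (a : PySem.Dict Int Int) :
    annotateGoB threshold ((fs, fe, c) :: faults) (p :: ps) a =
      annotateGoB threshold faults (annotateStepB threshold fs fe c (p :: ps) a).2
        (annotateStepB threshold fs fe c (p :: ps) a).1 := rfl

theorem goB_notmem (threshold : Int) :
    ∀ (faults pending : List (Int × Int × Int)) (a : PySem.Dict Int Int) (i : Int),
    i ∉ pending.map (·.1) →
    (annotateGoB threshold faults pending a).get? i = a.get? i := by
  intro faults
  induction faults with
  | nil => intro pending a i _; cases pending <;> rfl
  | cons f rest ih =>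
    intro pending a i hi
    obtain ⟨fs, fe, c⟩ := f
    cases pending with
    | nil => rfl
    | cons p ps =>
      rw [goB_cons, ih]
      · exact stepB_fst_notmem _ _ _ _ _ _ _ hi
      · rw [stepB_snd]
        intro hmem
        rcases List.mem_map.mp hmem with ⟨q, hq, hq1⟩
        exact hi (List.mem_map.mpr ⟨q, List.mem_of_mem_filter hq, hq1⟩)

theorem nodup_keys_of_mem_eq_fst {l : List (Int × Int × Int)} (hnd : (l.map (·.1)).Nodup)
    {p q : Int × Int × Int} (hp : p ∈ l) (hq : q ∈ l) (h : p.1 = q.1) : p = q := by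
  exact List.inj_on_of_nodup_map hnd hp hq h

theorem goB_mem (threshold : Int) :
    ∀ (faults pending : List (Int × Int × Int)) (a : PySem.Dict Int Int) (i s e : Int),
    (i, s, e) ∈ pending → (pending.map (·.1)).Nodup →
    (annotateGoB threshold faults pending a).get? i =
      match pvFq threshold s e faults with
      | some c => some c
      | none => a.get? i := by
  intro faults
  induction faults with
  | nil =>
    intro pending a i s e hmem _
    cases pending with
    | nil => simp at hmem
    | cons p ps => rfl
  | cons f rest ih =>
    intro pending a i s e hmem hnd
    obtain ⟨fs, fe, c⟩ := f
    cases pending with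
    | nil => simp at hmem
    | cons p ps =>
      rw [goB_cons]
      have hsnd := stepB_snd threshold fs fe c (p :: ps) a
      by_cases h : max 0 (min e fe - max s fs + 1) ≥ threshold
      · -- this fault claims (i,s,e): i leaves pending, assigned has it
        have hout : i ∉ ((annotateStepB threshold fs fe c (p :: ps) a).2).map (·.1) := by
          rw [hsnd]
          intro hin
          rcases List.mem_map.mp hin with ⟨q, hq, hq1⟩
          have hqmem := List.mem_of_mem_filter hq
          have := nodup_keys_of_mem_eq_fst hnd hqmem hmem hq1
          subst this
          have := List.of_mem_filter hq
          simp [h] at this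
        rw [goB_notmem _ _ _ _ _ hout, stepB_fst_mem _ _ _ _ _ _ _ _ _ hmem hnd, if_pos h]
        simp only [pvFq]
        rw [if_pos h]
      · -- not claimed: (i,s,e) stays pending, assigned lookup unchanged
        have hmem' : (i, s, e) ∈ (annotateStepB threshold fs fe c (p :: ps) a).2 := by
          rw [hsnd]
          refine List.mem_filter.mpr ⟨hmem, ?_⟩
          simp; omega
        have hnd' : (((annotateStepB threshold fs fe c (p :: ps) a).2).map (·.1)).Nodup := by
          rw [hsnd]
          exact hnd.sublist (List.Sublist.map _ List.filter_sublist)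
        rw [ih _ _ _ _ _ hmem' hnd', stepB_fst_mem _ _ _ _ _ _ _ _ _ hmem hnd, if_neg h]
        simp only [pvFq]
        rw [if_neg h]

theorem nodup_enum_keys (l : List (Int × Int)) :
    ((PySem.List.enumerate l 0).map (·.1)).Nodup := by
  rw [PySem.List.map_fst_enumerate]
  exact PySem.List.nodup_pyRange_one _ _

theorem altB_eq (intervals : List (Int × Int)) (faults : List (Int × Int × Int)) (threshold : Int) :
    annotate_intervals_py_alt intervals faults threshold
      = intervals.map (pvG threshold faults) := by
  unfold annotate_intervals_py_alt
  have key : ∀ (k : Nat) (hk : k < intervals.length),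
      (annotateGoB threshold faults (PySem.List.enumerate intervals 0) PySem.Dict.empty).getD (k : Int) (-1)
        = pvG threshold faults (intervals[k]'hk) := by
    intro k hk
    have hmem0 : ((0 : Int) + k, intervals[k]'hk) ∈ PySem.List.enumerate intervals 0 :=
      (PySem.List.mem_enumerate_iff _ _ _).mpr ⟨k, hk, rfl⟩
    have hmem : ((k : Int), (intervals[k]'hk).1, (intervals[k]'hk).2) ∈ PySem.List.enumerate intervals 0 := by
      simpa using hmem0
    rw [PySem.Dict.getD_eq_get?_getD]
    rw [goB_mem threshold faults _ _ (k : Int) (intervals[k]'hk).1 (intervals[k]'hk).2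
        hmem (nodup_enum_keys intervals)]
    cases hfq : pvFq threshold (intervals[k]'hk).1 (intervals[k]'hk).2 faults with
    | none => simp [pvG, hfq, PySem.Dict.get?_empty]
    | some c => simp [pvG, hfq]
  apply List.ext_getElem
  · simp [PySem.List.length_pyRange_one]
  · intro n h1 h2
    have hn : n < intervals.length := by simpa using h2
    simp only [List.getElem_map]
    rw [PySem.List.getElem_pyRange_one]
    have e1 : (0 : Int) + (n : Int) = ((n : Nat) : Int) := by omega
    rw [e1, key n hn]

theorem annotate_intervals_py_spec : Claim_equal_annotate_intervals_py := by
  intro intervals faults threshold _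
  unfold Spec_annotate_intervals_py
  rw [altB_eq]
  show annotate_intervals_py intervals faults threshold = _
  unfold annotate_intervals_py
  have := foldlA_eq threshold faults intervals []
  simpa using this
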